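-- pv_equiv track=rewrite | github.com/royashish-in/AgentAICoder | coding-crew/agents/code_quality_ai.py | _extract_optimizations
-- ===== SOURCE A (Python) =====
-- from typing import Dict, List, Any
--
-- def _extract_optimizations(optimization_content: str) -> List[Dict[str, Any]]:
--     """Extract structured optimizations."""
--     import re
--
--     optimizations = []
--     # Simple pattern matching for optimization suggestions
--     lines = optimization_content.split('\n')
--     current_opt = {}
--
--     for line in lines:
--         line = line.strip()
--         if 'optimization' in line.lower() or 'improvement' in line.lower():
--             if current_opt:
--                 optimizations.append(current_opt)
--             current_opt = {
--                 "title": line,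
--                 "description": "",
--                 "complexity": "Medium"
--             }
--         elif current_opt and line:
--             current_opt["description"] += line + " "
--             if 'low complexity' in line.lower():
--                 current_opt["complexity"] = "Low"
--             elif 'high complexity' in line.lower():
--                 current_opt["complexity"] = "High"
--
--     if current_opt:
--         optimizations.append(current_opt)
--
--     return optimizations[:5]  # Top 5 optimizations
-- ===== SOURCE B (Python) =====
-- def _is_header(line):
--     low = line.lower()
--     return 'optimization' in low or 'improvement' in low
--
--
-- def _complexity(body):
--     c = 'Medium'
--     for line in body:
--         low = line.lower()
--         if 'low complexity' in low:
--             c = 'Low'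
--         elif 'high complexity' in low:
--             c = 'High'
--     return c
--
--
-- def _make_opt(title, body):
--     nonempty = [l for l in body if l]
--     return {
--         "title": title,
--         "description": ''.join(l + ' ' for l in nonempty),
--         "complexity": _complexity(nonempty),
--     }
--
--
-- def _extract_optimizations(optimization_content):
--     """Two-pass: segment the stripped lines at header lines, then build each dict."""
--     lines = [l.strip() for l in optimization_content.split('\n')]
--     # discard everything before the first header line
--     while lines and not _is_header(lines[0]):
--         lines.pop(0)
--     optimizations = []
--     while lines:
--         title = lines.pop(0)
--         body = []
--         while lines and not _is_header(lines[0]):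
--             body.append(lines.pop(0))
--         optimizations.append(_make_opt(title, body))
--     return optimizations[:5]
-- ===== Notes on version B (the rewrite author's own statement) =====
-- stated objective: alternative
-- what changed: A's single-pass mutable-accumulator state machine (building each dict incrementally while scanning) is replaced by a two-pass segmentation: find the header lines, split the stripped lines into header-led segments, and build each result dict in one go (description by a join, complexity by a scan of the segment body).
import Mathlib
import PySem

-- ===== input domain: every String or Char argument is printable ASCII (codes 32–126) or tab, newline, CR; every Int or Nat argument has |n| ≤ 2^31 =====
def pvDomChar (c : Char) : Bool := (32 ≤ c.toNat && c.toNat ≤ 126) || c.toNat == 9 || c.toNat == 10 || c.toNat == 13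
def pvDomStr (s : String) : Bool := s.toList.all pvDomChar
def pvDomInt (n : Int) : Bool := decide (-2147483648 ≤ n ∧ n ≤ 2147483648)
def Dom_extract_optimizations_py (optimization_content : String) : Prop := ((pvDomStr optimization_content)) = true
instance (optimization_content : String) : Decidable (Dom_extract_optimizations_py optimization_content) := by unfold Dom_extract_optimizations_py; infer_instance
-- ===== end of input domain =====

-- B replaces A's single-pass accumulator state machine by a two-pass segmentation
-- (split the stripped lines at header lines, then build each record independently); objective: alternative decomposition, same cost.

-- ===== PORT A =====
-- A's loop body, applied to the already-stripped line (the loop strips first, then dispatches)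
def pvStepA (st : List (PySem.Dict String String) × PySem.Dict String String) (l : String) :
    List (PySem.Dict String String) × PySem.Dict String String :=
  if PySem.Str.isIn "optimization" (PySem.Str.lower l) || PySem.Str.isIn "improvement" (PySem.Str.lower l) then
    ((if st.2.items = [] then st.1 else st.1 ++ [st.2]),
     PySem.Dict.mk [("title", l), ("description", ""), ("complexity", "Medium")])
  else if st.2.items ≠ [] ∧ l ≠ "" then
    let d := st.2.modify "description" "" (fun s => s ++ (l ++ " "))
    let d := if PySem.Str.isIn "low complexity" (PySem.Str.lower l) then d.insert "complexity" "Low"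
             else if PySem.Str.isIn "high complexity" (PySem.Str.lower l) then d.insert "complexity" "High"
             else d
    (st.1, d)
  else st

def extract_optimizations_py (optimization_content : String) : List (List (String × String)) :=
  -- split? with the nonempty literal separator "\n" is always `some`
  let lines := (PySem.Str.split? optimization_content "\n").getD []
  let st := lines.foldl (fun st line => pvStepA st (PySem.Str.strip line)) ([], PySem.Dict.mk [])
  let optimizations := if st.2.items = [] then st.1 else st.1 ++ [st.2]
  (PySem.List.slice optimizations none (some 5)).map (fun d => d.items)

-- ===== PORT B =====
def pvIsHeaderB (line : String) : Bool :=
  let low := PySem.Str.lower line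
  PySem.Str.isIn "optimization" low || PySem.Str.isIn "improvement" low

def pvComplexityB (body : List String) : String :=
  body.foldl (fun c line =>
    let low := PySem.Str.lower line
    if PySem.Str.isIn "low complexity" low then "Low"
    else if PySem.Str.isIn "high complexity" low then "High"
    else c) "Medium"

def pvMakeOptB (title : String) (body : List String) : List (String × String) :=
  let nonempty := body.filter (fun l => l ≠ "")
  [("title", title),
   ("description", PySem.Str.join "" (nonempty.map (fun l => l ++ " "))),
   ("complexity", pvComplexityB nonempty)]

def pvSegsB (lines : List String) : List (List (String × String)) :=
  match lines with
  | [] => []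
  | title :: rest =>
      pvMakeOptB title (rest.takeWhile (fun l => !pvIsHeaderB l)) ::
        pvSegsB (rest.dropWhile (fun l => !pvIsHeaderB l))
termination_by lines.length
decreasing_by simpa using Nat.lt_succ_of_le (List.length_dropWhile_le _ _)

def extract_optimizations_py_alt (optimization_content : String) : List (List (String × String)) :=
  let lines := ((PySem.Str.split? optimization_content "\n").getD []).map PySem.Str.strip
  (pvSegsB (lines.dropWhile (fun l => !pvIsHeaderB l))).take 5

-- ===== PRECONDITION & SPEC =====
def Spec_extract_optimizations_py (optimization_content : String) (out : List (List (String × String))) : Prop := out = extract_optimizations_py_alt optimization_content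
instance (optimization_content : String) (out : List (List (String × String))) : Decidable (Spec_extract_optimizations_py optimization_content out) := by unfold Spec_extract_optimizations_py; infer_instance

-- ===== CLAIM (what is proved, stated in full; the proofs are below) =====
def Claim_equal_extract_optimizations_py : Prop := ∀ (optimization_content : String), Dom_extract_optimizations_py optimization_content → Spec_extract_optimizations_py optimization_content (extract_optimizations_py optimization_content)

-- ===== LEMMAS AND PROOFS =====

-- the partial record A carries: title / description / complexity, in insertion order
def pvPd (t d c : String) : PySem.Dict String String :=
  PySem.Dict.mk [("title", t), ("description", d), ("complexity", c)]

-- A's per-line complexity update, as a function of the old value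
def pvCStep (c l : String) : String :=
  if PySem.Str.isIn "low complexity" (PySem.Str.lower l) then "Low"
  else if PySem.Str.isIn "high complexity" (PySem.Str.lower l) then "High"
  else c

def pvFinish (st : List (PySem.Dict String String) × PySem.Dict String String) :
    List (PySem.Dict String String) :=
  if st.2.items = [] then st.1 else st.1 ++ [st.2]

theorem pvFinish_def (st : List (PySem.Dict String String) × PySem.Dict String String) :
    (if st.2.items = [] then st.1 else st.1 ++ [st.2]) = pvFinish st := rfl

theorem pvComplexityB_eq_foldl (body : List String) :
    pvComplexityB body = body.foldl pvCStep "Medium" := rfl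

theorem pvJoinNil : PySem.Str.join "" ([] : List String) = "" := by
  simp [PySem.Str.join, PySem.Chars.join_nil]

theorem pvJoinCons (x : String) (xs : List String) :
    PySem.Str.join "" (x :: xs) = x ++ PySem.Str.join "" xs := by
  cases xs with
  | nil => simp [PySem.Str.join, PySem.Chars.join_singleton, String.ofList_toList]
  | cons y ys =>
      simp [PySem.Str.join, PySem.Chars.join_cons_cons, String.ofList_append, String.ofList_toList]

theorem pvStepA_hdr (st : List (PySem.Dict String String) × PySem.Dict String String) (l : String)
    (h : pvIsHeaderB l = true) :
    pvStepA st l = (pvFinish st, pvPd l "" "Medium") := by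
  simp only [pvIsHeaderB] at h
  simp only [pvStepA, pvFinish, pvPd, h, if_pos]

theorem pvStepA_body (opts : List (PySem.Dict String String)) (t d c l : String)
    (h : pvIsHeaderB l = false) (hne : l ≠ "") :
    pvStepA (opts, pvPd t d c) l = (opts, pvPd t (d ++ (l ++ " ")) (pvCStep c l)) := by
  simp only [pvIsHeaderB] at h
  simp only [pvStepA, pvPd, pvCStep, h, Bool.false_eq_true, if_false]
  rw [if_pos (by exact ⟨by simp, hne⟩)]
  split_ifs <;> rfl

theorem pvStepA_blank (st : List (PySem.Dict String String) × PySem.Dict String String) :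
    pvStepA st "" = st := by
  have h : (PySem.Str.isIn "optimization" (PySem.Str.lower "") ||
            PySem.Str.isIn "improvement" (PySem.Str.lower "")) = false := by decide
  simp only [pvStepA, h, Bool.false_eq_true, if_false, ne_eq, not_true_eq_false, and_false]

theorem pvStepA_empty_cur (opts : List (PySem.Dict String String)) (l : String)
    (h : pvIsHeaderB l = false) :
    pvStepA (opts, PySem.Dict.mk []) l = (opts, PySem.Dict.mk []) := by
  simp only [pvIsHeaderB] at h
  simp only [pvStepA, h, Bool.false_eq_true, if_false]
  simp

theorem pvRun (ls : List String) (opts : List (PySem.Dict String String)) (t d c : String) :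
    (pvFinish (ls.foldl pvStepA (opts, pvPd t d c))).map PySem.Dict.items
    = opts.map PySem.Dict.items ++
      ([("title", t),
        ("description", d ++ PySem.Str.join ""
          (((ls.takeWhile (fun l => !pvIsHeaderB l)).filter (fun l => l ≠ "")).map (fun l => l ++ " "))),
        ("complexity", ((ls.takeWhile (fun l => !pvIsHeaderB l)).filter (fun l => l ≠ "")).foldl pvCStep c)]
        :: pvSegsB (ls.dropWhile (fun l => !pvIsHeaderB l))) := by
  induction ls generalizing opts t d c with
  | nil =>
      simp [pvFinish, pvPd, pvSegsB, pvJoinNil, String.append_empty]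
  | cons l ls ih =>
      by_cases hh : pvIsHeaderB l
      · rw [List.foldl_cons, pvStepA_hdr _ _ hh]
        have hfin : pvFinish (opts, pvPd t d c) = opts ++ [pvPd t d c] := by
          simp [pvFinish, pvPd]
        rw [hfin, ih]
        simp [hh, pvSegsB, pvMakeOptB, pvComplexityB_eq_foldl, pvJoinNil,
              String.append_empty, String.empty_append, pvPd,
              List.takeWhile, List.dropWhile]
      · by_cases he : l = ""
        · subst he
          rw [List.foldl_cons, pvStepA_blank, ih]
          simp [hh, List.takeWhile, List.dropWhile]
        · rw [List.foldl_cons, pvStepA_body _ _ _ _ _ (by simpa using hh) he, ih]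
          rw [List.takeWhile_cons_of_pos (by simp [hh]),
              List.dropWhile_cons_of_pos (by simp [hh]),
              List.filter_cons_of_pos (by simpa using he),
              List.foldl_cons, List.map_cons, pvJoinCons]
          simp [String.append_assoc]

theorem pvRun0 (ls : List String) (opts : List (PySem.Dict String String)) :
    (pvFinish (ls.foldl pvStepA (opts, PySem.Dict.mk []))).map PySem.Dict.items
    = opts.map PySem.Dict.items ++ pvSegsB (ls.dropWhile (fun l => !pvIsHeaderB l)) := by
  induction ls generalizing opts with
  | nil => simp [pvFinish, pvSegsB]
  | cons l ls ih =>
      by_cases hh : pvIsHeaderB l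
      · rw [List.foldl_cons, pvStepA_hdr _ _ hh]
        have hfin : pvFinish (opts, PySem.Dict.mk []) = opts := by
          simp [pvFinish]
        rw [hfin, pvRun]
        simp [hh, pvSegsB, pvMakeOptB, pvComplexityB_eq_foldl,
              String.empty_append, List.dropWhile]
      · rw [List.foldl_cons, pvStepA_empty_cur _ _ (by simpa using hh), ih]
        simp [hh, List.dropWhile]

-- ===== VERDICT (by name: the statement is the Claim_ definition above) =====
theorem extract_optimizations_py_spec : Claim_equal_extract_optimizations_py := by
  intro content _
  show extract_optimizations_py content = extract_optimizations_py_alt content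
  simp only [extract_optimizations_py, extract_optimizations_py_alt]
  rw [List.foldl_map (f := PySem.Str.strip) (g := pvStepA) |>.symm]
  rw [pvFinish_def, PySem.List.slice_to _ (by norm_num)]
  rw [show ((5 : Int).toNat) = 5 from rfl, List.map_take, pvRun0]
  simp
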